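-- pv_equiv track=rewrite | github.com/gurneetBaran311/myLeetCodeSolutions | 3872-find-most-frequent-vowel-and-consonant/find-most-frequent-vowel-and-consonant.py | maxFreqSum
-- ===== SOURCE A (Python) =====
-- def maxFreqSum(s: str) -> int:
--     vowels = {'a','e','i','o','u'}
--     map = {}
--     kmax = cmax = 0
--     for ch in s:
--         map[ch] = map.get(ch,0)+1
--         if ch in vowels:
--             kmax = max(kmax,map[ch])
--         else:
--             cmax = max(cmax,map[ch])
--     return kmax + cmax
-- ===== SOURCE B (Python) =====
-- def maxFreqSum(s: str) -> int:
--     chars = list(s)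
--     kmax = max((chars.count(v) for v in 'aeiou'), default=0)
--     cmax = max((chars.count(c) for c in set(chars) if c not in 'aeiou'), default=0)
--     return kmax + cmax
-- ===== Notes on version B (the rewrite author's own statement) =====
-- stated objective: alternative
-- what changed: B builds no frequency table and keeps no running maxima: it takes the max of chars.count(v) over the five vowel literals directly, and the max of chars.count(c) over the distinct non-vowel characters, i.e. brute-force counting per candidate character instead of A's single-pass incremental dict with interleaved maxima (O(n*d) vs O(n)).
import Mathlib
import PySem

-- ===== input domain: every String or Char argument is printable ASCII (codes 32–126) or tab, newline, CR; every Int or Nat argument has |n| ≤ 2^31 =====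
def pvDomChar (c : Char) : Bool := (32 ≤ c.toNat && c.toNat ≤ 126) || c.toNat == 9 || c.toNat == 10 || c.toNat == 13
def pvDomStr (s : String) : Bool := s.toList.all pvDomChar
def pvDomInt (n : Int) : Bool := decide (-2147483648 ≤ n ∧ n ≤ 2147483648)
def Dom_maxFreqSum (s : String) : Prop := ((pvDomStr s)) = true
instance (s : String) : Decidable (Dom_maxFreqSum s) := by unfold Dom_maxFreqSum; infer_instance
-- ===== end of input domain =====

-- B keeps no frequency table and no running maxima: it takes max(count(v)) over the
-- five vowel literals and max(count(c)) over the distinct non-vowel characters,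
-- counting each candidate by a direct scan (objective: alternative algorithm).

-- the vowels set literal {'a','e','i','o','u'} of A
def pvVowels : PySem.Set Char := PySem.Set.ofList ['a', 'e', 'i', 'o', 'u']

-- ===== PORT A =====
-- one loop: count in a dict and update the running vowel/consonant maxima together
def maxFreqSum (s : String) : Int :=
  let r := s.toList.foldl
    (fun (st : PySem.Dict Char Int × Int × Int) ch =>
      let m := st.1.insert ch (st.1.getD ch 0 + 1)
      if PySem.Set.contains pvVowels ch then
        (m, max st.2.1 (m.getD ch 0), st.2.2)   -- map[ch] exists: just inserted
      else
        (m, st.2.1, max st.2.2 (m.getD ch 0)))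
    (PySem.Dict.empty, 0, 0)
  r.2.1 + r.2.2

-- ===== PORT B =====
-- no table: max of chars.count(v) over the vowel literals, and over set(chars) minus vowels
def maxFreqSum_alt (s : String) : Int :=
  let chars := s.toList
  let kmax := PySem.List.maxD
    ((['a', 'e', 'i', 'o', 'u'].map (fun v => (chars.count v : Int)))) (fun x => x) 0
  let cmax := PySem.List.maxD
    (((PySem.Set.ofList chars).filter
        (fun c => !(['a', 'e', 'i', 'o', 'u'].contains c))).map
      (fun c => (chars.count c : Int))) (fun x => x) 0
  kmax + cmax

-- ===== PRECONDITION & SPEC =====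
def Spec_maxFreqSum (s : String) (out : Int) : Prop := out = maxFreqSum_alt s
instance (s : String) (out : Int) : Decidable (Spec_maxFreqSum s out) := by unfold Spec_maxFreqSum; infer_instance

-- ===== CLAIM (what is proved, stated in full; the proofs are below) =====
def Claim_equal_maxFreqSum : Prop := ∀ (s : String), Dom_maxFreqSum s → Spec_maxFreqSum s (maxFreqSum s)

-- ===== LEMMAS AND PROOFS =====

-- the common value: running max of counts (in cs) over the keys of cs satisfying p
def pvF (p : Char → Bool) (cs : List Char) : Int :=
  ((PySem.Set.ofList cs).filter p).foldl (fun a k => max a ((cs.count k : Int))) 0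

theorem pv_vowel_contains (c : Char) :
    PySem.Set.contains pvVowels c = ['a', 'e', 'i', 'o', 'u'].contains c := by
  by_cases h : c ∈ ['a', 'e', 'i', 'o', 'u'] <;>
    simp [pvVowels, PySem.Set.mem_ofList, h]

theorem pv_foldl_max_update {l : List Char} {f g : Char → Int} {x : Char}
    (hx : x ∈ l) (hne : ∀ k ∈ l, k ≠ x → g k = f k) (hle : f x ≤ g x) :
    l.foldl (fun a k => max a (g k)) 0 = max (l.foldl (fun a k => max a (f k)) 0) (g x) := by
  have hmg : l.foldl (fun a k => max a (g k)) 0 = (l.map g).foldl max 0 := by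
    rw [List.foldl_map]
  have hmf : l.foldl (fun a k => max a (f k)) 0 = (l.map f).foldl max 0 := by
    rw [List.foldl_map]
  apply le_antisymm
  · rw [hmg]
    rcases PySem.List.foldl_max_mem (l.map g) 0 with h0 | hmem
    · rw [h0]
      exact le_max_of_le_left (PySem.List.le_foldl_max_int l f 0).1
    · rcases List.mem_map.mp hmem with ⟨k, hk, hgk⟩
      rw [← hgk]
      by_cases hkx : k = x
      · subst hkx; exact le_max_right _ _
      · rw [hne k hk hkx]
        exact le_max_of_le_left ((PySem.List.le_foldl_max_int l f 0).2 k hk)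
  · apply max_le
    · rw [hmf]
      rcases PySem.List.foldl_max_mem (l.map f) 0 with h0 | hmem
      · rw [h0]; exact (PySem.List.le_foldl_max_int l g 0).1
      · rcases List.mem_map.mp hmem with ⟨k, hk, hfk⟩
        rw [← hfk]
        have hfg : f k ≤ g k := by
          by_cases hkx : k = x
          · subst hkx; exact hle
          · rw [hne k hk hkx]
        exact le_trans hfg ((PySem.List.le_foldl_max_int l g 0).2 k hk)
    · exact (PySem.List.le_foldl_max_int l g 0).2 x hx

theorem pv_count_ne (cs : List Char) (x k : Char) (h : k ≠ x) :
    (cs ++ [x]).count k = cs.count k := by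
  simp [List.count_append, Ne.symm h]

theorem pvF_step (p : Char → Bool) (cs : List Char) (x : Char) :
    pvF p (cs ++ [x]) =
      if p x then max (pvF p cs) ((cs.count x : Int) + 1) else pvF p cs := by
  unfold pvF
  have hcx : ((cs ++ [x]).count x : Int) = (cs.count x : Int) + 1 := by
    simp [List.count_append]
  rw [PySem.Set.ofList_append_singleton]
  by_cases hxc : x ∈ cs
  · have hcont : (PySem.Set.ofList cs).contains x = true := by
      simp [PySem.Set.mem_ofList, hxc]
    rw [PySem.Set.add, if_pos hcont]
    by_cases hpx : p x = true
    · rw [if_pos hpx]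
      have hxl : x ∈ (PySem.Set.ofList cs).filter p := by
        simp [List.mem_filter, PySem.Set.mem_ofList, hxc, hpx]
      rw [pv_foldl_max_update hxl (fun k _ hk => by rw [pv_count_ne cs x k hk])
            (by rw [hcx]; omega), hcx]
    · rw [if_neg hpx]
      apply PySem.List.foldl_congr_mem
      intro a k hk
      have hkp := (List.mem_filter.mp hk).2
      have hkx : k ≠ x := fun h => hpx (h ▸ hkp)
      rw [pv_count_ne cs x k hkx]
  · have hcont : ¬ (PySem.Set.ofList cs).contains x = true := by
      simp [PySem.Set.mem_ofList, hxc]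
    rw [PySem.Set.add, if_neg hcont, List.filter_append]
    by_cases hpx : p x = true
    · rw [if_pos hpx]
      have : List.filter p [x] = [x] := by simp [hpx]
      rw [this, List.foldl_append]
      have hcong : ((PySem.Set.ofList cs).filter p).foldl
            (fun a k => max a (((cs ++ [x]).count k : Int))) 0
          = ((PySem.Set.ofList cs).filter p).foldl
            (fun a k => max a ((cs.count k : Int))) 0 := by
        apply PySem.List.foldl_congr_mem
        intro a k hk
        have hkm := (PySem.Set.mem_ofList cs k).mp (List.mem_filter.mp hk).1
        have hkx : k ≠ x := fun h => hxc (h ▸ hkm)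
        rw [pv_count_ne cs x k hkx]
      simp only [List.foldl_cons, List.foldl_nil, hcong, hcx]
    · rw [if_neg hpx]
      have : List.filter p [x] = [] := by simp [hpx]
      rw [this, List.append_nil]
      apply PySem.List.foldl_congr_mem
      intro a k hk
      have hkm := (PySem.Set.mem_ofList cs k).mp (List.mem_filter.mp hk).1
      have hkx : k ≠ x := fun h => hxc (h ▸ hkm)
      rw [pv_count_ne cs x k hkx]

-- A's loop invariant: dict is the counter, the running maxima are pvF
theorem pv_loopA (cs : List Char) :
    cs.foldl
      (fun (st : PySem.Dict Char Int × Int × Int) ch =>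
        let m := st.1.insert ch (st.1.getD ch 0 + 1)
        if PySem.Set.contains pvVowels ch then
          (m, max st.2.1 (m.getD ch 0), st.2.2)
        else
          (m, st.2.1, max st.2.2 (m.getD ch 0)))
      (PySem.Dict.empty, 0, 0)
    = (PySem.Dict.counter cs,
       pvF (fun c => PySem.Set.contains pvVowels c) cs,
       pvF (fun c => !PySem.Set.contains pvVowels c) cs) := by
  induction cs using List.reverseRecOn with
  | nil => rfl
  | append_singleton cs x ih =>
    rw [List.foldl_append, ih]
    have hd : (PySem.Dict.counter cs).insert x ((PySem.Dict.counter cs).getD x 0 + 1)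
        = PySem.Dict.counter (cs ++ [x]) := by
      rw [← PySem.Dict.foldl_insert_getD_add_one_eq_counter cs,
          ← PySem.Dict.foldl_insert_getD_add_one_eq_counter (cs ++ [x]),
          List.foldl_append]
      rfl
    have hg : (PySem.Dict.counter (cs ++ [x])).getD x 0 = (cs.count x : Int) + 1 := by
      rw [PySem.Dict.getD_counter]
      simp [List.count_append]
    by_cases hv : PySem.Set.contains pvVowels x = true
    · simp only [List.foldl_cons, List.foldl_nil, hd, hv, if_pos, hg,
        pvF_step (fun c => PySem.Set.contains pvVowels c) cs x,
        pvF_step (fun c => !PySem.Set.contains pvVowels c) cs x]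
      simp
    · simp only [List.foldl_cons, List.foldl_nil, hd, hv, hg,
        pvF_step (fun c => PySem.Set.contains pvVowels c) cs x,
        pvF_step (fun c => !PySem.Set.contains pvVowels c) cs x]
      simp

theorem pv_maxD_nonneg (l : List Int) (h : ∀ y ∈ l, 0 ≤ y) :
    PySem.List.maxD l (fun x => x) 0 = l.foldl max 0 := by
  cases l with
  | nil => rfl
  | cons x t =>
    rw [PySem.List.maxD, PySem.List.max?_id_cons, Option.getD_some, List.foldl_cons]
    have : max 0 x = x := max_eq_right (h x (List.mem_cons_self))
    rw [this]

-- running max over l1 ≤ running max over l2 when every l1-key is in l2 or contributes ≤ 0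
theorem pv_fold_le (l1 l2 : List Char) (f : Char → Int)
    (h : ∀ k ∈ l1, f k ≤ 0 ∨ k ∈ l2) :
    l1.foldl (fun a k => max a (f k)) 0 ≤ l2.foldl (fun a k => max a (f k)) 0 := by
  have h1 : l1.foldl (fun a k => max a (f k)) 0 = (l1.map f).foldl max 0 := by
    rw [List.foldl_map]
  rw [h1]
  rcases PySem.List.foldl_max_mem (l1.map f) 0 with h0 | hmem
  · rw [h0]; exact (PySem.List.le_foldl_max_int l2 f 0).1
  · rcases List.mem_map.mp hmem with ⟨k, hk, hfk⟩
    rw [← hfk]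
    rcases h k hk with hle | hmem2
    · exact le_trans hle (PySem.List.le_foldl_max_int l2 f 0).1
    · exact (PySem.List.le_foldl_max_int l2 f 0).2 k hmem2

-- B's kmax (max of counts over the five vowel literals) equals A's running vowel max
theorem pv_kmax (cs : List Char) :
    PySem.List.maxD (['a', 'e', 'i', 'o', 'u'].map (fun v => (cs.count v : Int)))
      (fun x => x) 0 = pvF (fun c => PySem.Set.contains pvVowels c) cs := by
  have hnn : ∀ y ∈ ['a', 'e', 'i', 'o', 'u'].map (fun v => (cs.count v : Int)), 0 ≤ y := by
    intro y hy
    rcases List.mem_map.mp hy with ⟨k, _, hk⟩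
    rw [← hk]; exact Int.natCast_nonneg _
  rw [pv_maxD_nonneg _ hnn, List.foldl_map]
  unfold pvF
  apply le_antisymm
  · apply pv_fold_le
    intro k hk
    by_cases hc : k ∈ cs
    · right
      refine List.mem_filter.mpr ⟨(PySem.Set.mem_ofList cs k).mpr hc, ?_⟩
      rw [pv_vowel_contains]
      exact List.elem_eq_true_of_mem hk
    · left
      rw [List.count_eq_zero.mpr hc]
      simp
  · apply pv_fold_le
    intro k hk
    right
    have := (List.mem_filter.mp hk).2
    rw [pv_vowel_contains] at this
    exact List.mem_of_elem_eq_true this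

-- B's cmax pass equals A's running consonant max
theorem pv_cmax (cs : List Char) :
    PySem.List.maxD
      (((PySem.Set.ofList cs).filter
          (fun c => !(['a', 'e', 'i', 'o', 'u'].contains c))).map
        (fun c => (cs.count c : Int))) (fun x => x) 0
    = pvF (fun c => !PySem.Set.contains pvVowels c) cs := by
  have hfe : (PySem.Set.ofList cs).filter (fun c => !(['a', 'e', 'i', 'o', 'u'].contains c))
      = (PySem.Set.ofList cs).filter (fun c => !PySem.Set.contains pvVowels c) := by
    apply List.filter_congr
    intro k _
    rw [pv_vowel_contains]
  have hnn : ∀ y ∈ ((PySem.Set.ofList cs).filter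
        (fun c => !PySem.Set.contains pvVowels c)).map (fun c => (cs.count c : Int)), 0 ≤ y := by
    intro y hy
    rcases List.mem_map.mp hy with ⟨k, _, hk⟩
    rw [← hk]; exact Int.natCast_nonneg _
  rw [hfe, pv_maxD_nonneg _ hnn, List.foldl_map]
  rfl

-- ===== VERDICT (by name: the statement is the Claim_ definition above) =====
theorem maxFreqSum_spec : Claim_equal_maxFreqSum := by
  intro s _
  show maxFreqSum s = maxFreqSum_alt s
  unfold maxFreqSum maxFreqSum_alt
  simp only [pv_loopA, pv_kmax, pv_cmax]
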